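-- pv_equiv track=rewrite | github.com/ankanghosh/algoexpert-coding | python/hard/largest_range/largest_range.py | largestRange
-- ===== SOURCE A (Python) =====
-- def largestRange(array):
--     # Initialize variables to store the best range and the length of the longest range found so far
--     bestRange = []
--     longestLength = 0
--     # Create a dictionary to keep track of the numbers that have been visited
--     nums = {}
--
--     # Populate the dictionary, setting all numbers to True, indicating they have not been visited yet
--     for num in array:
--         nums[num] = True
--
--     # Iterate through each number in the array
--     for num in array:
--         # If the number has already been visited, skip it
--         if not nums[num]:
--             continue
--
--         # Mark the number as visited
--         nums[num] = False
--         # Initialize the length of the current range to 1 (the current number itself)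
--         currentLength = 1
--         # Set up pointers to check numbers to the left and right of the current number
--         left = num - 1
--         right = num + 1
--
--         # Expand the range to the left
--         while left in nums:
--             # Mark the left number as visited
--             nums[left] = False
--             # Increase the length of the current range
--             currentLength += 1
--             # Move the left pointer further left
--             left -= 1
--
--         # Expand the range to the right
--         while right in nums:
--             # Mark the right number as visited
--             nums[right] = False
--             # Increase the length of the current range
--             currentLength += 1
--             # Move the right pointer further right
--             right += 1
--
--         # If the current range is longer than the longest range found so far, update the best range
--         if currentLength > longestLength:
--             longestLength = currentLength
--             # Store the range as [left + 1, right - 1], since left and right are one step beyond the actual range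
--             bestRange = [left + 1, right - 1]
--
--     # Return the best (largest) range found
--     return bestRange
-- ===== SOURCE B (Python) =====
-- def largestRange(array):
--     # Sort the distinct values and split into maximal consecutive runs;
--     # map each value to its run's bounds and length, then scan the original
--     # array order with a strict '>' update to keep A's tie-breaking.
--     run = {}
--     vals = sorted(set(array))
--     i = 0
--     n = len(vals)
--     while i < n:
--         j = i
--         while j + 1 < n and vals[j + 1] == vals[j] + 1:
--             j += 1
--         lo, hi = vals[i], vals[j]
--         length = j - i + 1
--         for k in range(i, j + 1):
--             run[vals[k]] = (lo, hi, length)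
--         i = j + 1
--     bestRange = []
--     longestLength = 0
--     for num in array:
--         lo, hi, length = run[num]
--         if length > longestLength:
--             longestLength = length
--             bestRange = [lo, hi]
--     return bestRange
-- ===== Notes on version B (the rewrite author's own statement) =====
-- stated objective: alternative
-- what changed: B sorts the distinct values once, splits the sorted sequence into maximal consecutive runs to build a value-to-(lo,hi,length) map, then scans the original array with a strict '>' update; A instead expands left/right from each unvisited element through a visited-marking dict.
import Mathlib
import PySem

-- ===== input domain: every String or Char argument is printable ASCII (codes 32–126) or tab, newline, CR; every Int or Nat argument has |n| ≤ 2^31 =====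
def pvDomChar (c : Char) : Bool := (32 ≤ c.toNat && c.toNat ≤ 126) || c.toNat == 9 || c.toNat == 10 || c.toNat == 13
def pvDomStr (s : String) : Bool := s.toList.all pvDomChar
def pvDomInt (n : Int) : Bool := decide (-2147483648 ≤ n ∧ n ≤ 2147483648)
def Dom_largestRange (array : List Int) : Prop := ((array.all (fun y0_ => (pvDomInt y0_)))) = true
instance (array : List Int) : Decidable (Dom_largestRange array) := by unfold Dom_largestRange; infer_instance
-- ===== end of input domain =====

-- B rebuilds the answer by sorting the distinct values into maximal consecutive runs and
-- scanning the original array with a strict '>' update (alternative decomposition, not faster).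

-- ===== PORT A =====
-- 'while left in nums: nums[left]=False; currentLength+=1; left-=1' — fuel-guarded loop;
-- fuel = number of keys + 1 always suffices (each iteration visits a distinct key).
def pvMarkLeft : PySem.Dict Int Bool → Int → Int → Nat → PySem.Dict Int Bool × Int × Int
  | d, left, cur, 0 => (d, left, cur)
  | d, left, cur, fuel+1 =>
    if d.contains left then pvMarkLeft (d.insert left false) (left - 1) (cur + 1) fuel
    else (d, left, cur)

-- 'while right in nums: nums[right]=False; currentLength+=1; right+=1'
def pvMarkRight : PySem.Dict Int Bool → Int → Int → Nat → PySem.Dict Int Bool × Int × Int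
  | d, right, cur, 0 => (d, right, cur)
  | d, right, cur, fuel+1 =>
    if d.contains right then pvMarkRight (d.insert right false) (right + 1) (cur + 1) fuel
    else (d, right, cur)

-- the body of A's main 'for num in array' loop; state = (bestRange, longestLength, nums)
def pvAStep (fuel : Nat) (st : List Int × Int × PySem.Dict Int Bool) (num : Int) :
    List Int × Int × PySem.Dict Int Bool :=
  if !(st.2.2.getD num false) then st
  else
    let d1 := st.2.2.insert num false
    let (d2, left, cur1) := pvMarkLeft d1 (num - 1) 1 fuel
    let (d3, right, cur2) := pvMarkRight d2 (num + 1) cur1 fuel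
    if cur2 > st.2.1 then ([left + 1, right - 1], cur2, d3) else (st.1, st.2.1, d3)

def largestRange (array : List Int) : List Int :=
  let nums := array.foldl (fun d num => d.insert num true) PySem.Dict.empty
  (array.foldl (pvAStep (nums.size + 1)) (([] : List Int), (0 : Int), nums)).1

-- ===== PORT B =====
-- inner 'while j + 1 < n and vals[j+1] == vals[j] + 1: j += 1' (indices are Nat, always in range)
def pvRunEnd (vals : List Int) (n j : Nat) : Nat :=
  if h : j + 1 < n ∧ vals.getD (j+1) 0 = vals.getD j 0 + 1 then pvRunEnd vals n (j+1) else j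
  termination_by n - j
  decreasing_by omega

-- pvRunEnd only moves j forward (cited by pvBuildRuns's decreasing_by)
theorem pvRunEnd_ge (vals : List Int) (n j : Nat) : j ≤ pvRunEnd vals n j := by
  induction j using pvRunEnd.induct vals n with
  | case1 j h ih => rw [pvRunEnd, dif_pos h]; omega
  | case2 j h => rw [pvRunEnd, dif_neg h]

-- outer 'while i < n' loop of Source B: split sorted distinct vals into runs, fill 'run' dict
def pvBuildRuns (vals : List Int) (n i : Nat) (d : PySem.Dict Int (Int × Int × Int)) :
    PySem.Dict Int (Int × Int × Int) :=
  if h : i < n then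
    let j := pvRunEnd vals n i
    let lo := vals.getD i 0
    let hi := vals.getD j 0
    let len : Int := ((j - i + 1 : Nat) : Int)
    let d' := (List.range' i (j + 1 - i)).foldl (fun d k => d.insert (vals.getD k 0) (lo, hi, len)) d
    pvBuildRuns vals n (j + 1) d'
  else d
  termination_by n - i
  decreasing_by have := pvRunEnd_ge vals n i; omega

-- the body of Source B's final 'for num in array' loop; state = (bestRange, longestLength)
def pvBStep (runs : PySem.Dict Int (Int × Int × Int)) (st : List Int × Int) (num : Int) :
    List Int × Int :=
  match runs.get? num with
  | some (lo, hi, len) => if len > st.2 then ([lo, hi], len) else st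
  | none => st   -- unreachable: every element of array is a key of 'run'

def largestRange_alt (array : List Int) : List Int :=
  let vals := PySem.List.sorted (PySem.Set.ofList array) (fun x => x) false
  let runs := pvBuildRuns vals vals.length 0 PySem.Dict.empty
  (array.foldl (pvBStep runs) (([] : List Int), (0 : Int))).1

-- ===== PRECONDITION & SPEC =====
def Spec_largestRange (array : List Int) (out : List Int) : Prop := out = largestRange_alt array
instance (array : List Int) (out : List Int) : Decidable (Spec_largestRange array out) := by unfold Spec_largestRange; infer_instance

-- ===== CLAIM (what is proved, stated in full; the proofs are below) =====
def Claim_equal_largestRange : Prop := ∀ (array : List Int), Dom_largestRange array → Spec_largestRange array (largestRange array)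

-- ===== LEMMAS AND PROOFS =====

-- x's maximal consecutive run inside 'array' is exactly [lo, hi]
def IsRun (array : List Int) (x lo hi : Int) : Prop :=
  lo ≤ x ∧ x ≤ hi ∧ (∀ y, lo ≤ y → y ≤ hi → y ∈ array) ∧ lo - 1 ∉ array ∧ hi + 1 ∉ array

theorem isRun_of_mem {array : List Int} {x lo hi y : Int} (h : IsRun array x lo hi)
    (h1 : lo ≤ y) (h2 : y ≤ hi) : IsRun array y lo hi :=
  ⟨h1, h2, h.2.2.1, h.2.2.2.1, h.2.2.2.2⟩

theorem isRun_unique {array : List Int} {x lo hi lo' hi' : Int}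
    (h : IsRun array x lo hi) (h' : IsRun array x lo' hi') : lo = lo' ∧ hi = hi' := by
  obtain ⟨a1, a2, acov, alo, ahi⟩ := h
  obtain ⟨b1, b2, bcov, blo, bhi⟩ := h'
  constructor
  · by_contra hne
    rcases lt_or_gt_of_ne hne with hlt | hgt
    · exact blo (acov (lo' - 1) (by omega) (by omega))
    · exact alo (bcov (lo - 1) (by omega) (by omega))
  · by_contra hne
    rcases lt_or_gt_of_ne hne with hlt | hgt
    · exact ahi (bcov (hi + 1) (by omega) (by omega))
    · exact bhi (acov (hi' + 1) (by omega) (by omega))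

-- x has not been visited yet after processing prefix p
def UnVis (array p : List Int) (x : Int) : Prop :=
  ∀ q ∈ p, ∀ lo hi, IsRun array x lo hi → ¬(lo ≤ q ∧ q ≤ hi)

theorem foldl_insert_const_get? {β ν : Type} (f : β → Int) (v : ν) :
    ∀ (l : List β) (d : PySem.Dict Int ν) (x : Int),
      ((l.foldl (fun d k => d.insert (f k) v) d).get? x)
        = if (∃ k ∈ l, f k = x) then some v else d.get? x := by
  intro l
  induction l with
  | nil => intro d x; simp
  | cons a l ih =>
    intro d x
    rw [List.foldl_cons, ih, PySem.Dict.get?_insert]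
    split_ifs with h1 h2 h2 <;> simp_all <;> tauto

theorem pvMarkLeft_spec (lo : Int) :
    ∀ (k : Nat) (d : PySem.Dict Int Bool) (c : Int) (fuel : Nat), k < fuel →
      (∀ y : Int, lo ≤ y → y ≤ lo - 1 + k → d.contains y = true) →
      d.contains (lo - 1) = false →
      ∃ d', pvMarkLeft d (lo - 1 + k) c fuel = (d', lo - 1, c + k) ∧
        d'.keys = d.keys ∧
        ∀ x, d'.get? x = if lo ≤ x ∧ x ≤ lo - 1 + k then some false else d.get? x := by
  intro k
  induction k with
  | zero =>
    intro d c fuel hf hcov hstop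
    obtain ⟨f, rfl⟩ : ∃ f, fuel = f + 1 := ⟨fuel - 1, by omega⟩
    refine ⟨d, ?_, rfl, ?_⟩
    · show pvMarkLeft d (lo - 1 + ((0:Nat):Int)) c (f+1) = _
      simp [pvMarkLeft, hstop]
    · intro x
      have h : ¬(lo ≤ x ∧ x ≤ lo - 1 + ((0:Nat):Int)) := by push_cast; omega
      rw [if_neg h]
  | succ k ih =>
    intro d c fuel hf hcov hstop
    obtain ⟨f, rfl⟩ : ∃ f, fuel = f + 1 := ⟨fuel - 1, by omega⟩
    have hstart : d.contains (lo - 1 + ((k+1:Nat):Int)) = true :=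
      hcov _ (by push_cast; omega) (by push_cast; omega)
    have hne : (lo - 1 : Int) ≠ lo - 1 + ((k+1:Nat):Int) := by push_cast; omega
    have harg : lo - 1 + ((k+1:Nat):Int) - 1 = lo - 1 + ((k:Nat):Int) := by push_cast; ring
    obtain ⟨d', heq, hkeys, hget⟩ := ih (d.insert (lo - 1 + ((k+1:Nat):Int)) false) (c+1) f
      (by omega)
      (fun y h1 h2 => by
        rw [PySem.Dict.contains_insert]
        simp [hcov y h1 (by push_cast at h2 ⊢; omega)])
      (by rw [PySem.Dict.contains_insert]; simp [hstop]; push_cast; omega)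
    refine ⟨d', ?_, ?_, ?_⟩
    · rw [pvMarkLeft, if_pos hstart, harg, heq]
      have : c + 1 + ((k:Nat):Int) = c + ((k+1:Nat):Int) := by push_cast; ring
      rw [this]
    · rw [hkeys, PySem.Dict.keys_insert_of_contains _ _ hstart]
    · intro x
      rw [hget x, PySem.Dict.get?_insert]
      by_cases hx : x = lo - 1 + ((k+1:Nat):Int) <;> push_cast at hx ⊢ <;>
        split_ifs <;> first | rfl | omega

theorem pvMarkRight_spec (hi : Int) :
    ∀ (k : Nat) (d : PySem.Dict Int Bool) (c : Int) (fuel : Nat), k < fuel →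
      (∀ y : Int, hi + 1 - k ≤ y → y ≤ hi → d.contains y = true) →
      d.contains (hi + 1) = false →
      ∃ d', pvMarkRight d (hi + 1 - k) c fuel = (d', hi + 1, c + k) ∧
        d'.keys = d.keys ∧
        ∀ x, d'.get? x = if hi + 1 - k ≤ x ∧ x ≤ hi then some false else d.get? x := by
  intro k
  induction k with
  | zero =>
    intro d c fuel hf hcov hstop
    obtain ⟨f, rfl⟩ : ∃ f, fuel = f + 1 := ⟨fuel - 1, by omega⟩
    refine ⟨d, ?_, rfl, ?_⟩
    · show pvMarkRight d (hi + 1 - ((0:Nat):Int)) c (f+1) = _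
      simp [pvMarkRight, hstop]
    · intro x
      have h : ¬(hi + 1 - ((0:Nat):Int) ≤ x ∧ x ≤ hi) := by push_cast; omega
      rw [if_neg h]
  | succ k ih =>
    intro d c fuel hf hcov hstop
    obtain ⟨f, rfl⟩ : ∃ f, fuel = f + 1 := ⟨fuel - 1, by omega⟩
    have hstart : d.contains (hi + 1 - ((k+1:Nat):Int)) = true :=
      hcov _ le_rfl (by push_cast; omega)
    have harg : hi + 1 - ((k+1:Nat):Int) + 1 = hi + 1 - ((k:Nat):Int) := by push_cast; ring
    obtain ⟨d', heq, hkeys, hget⟩ := ih (d.insert (hi + 1 - ((k+1:Nat):Int)) false) (c+1) f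
      (by omega)
      (fun y h1 h2 => by
        rw [PySem.Dict.contains_insert]
        simp [hcov y (by push_cast at h1 ⊢; omega) h2])
      (by rw [PySem.Dict.contains_insert]; simp [hstop]; omega)
    refine ⟨d', ?_, ?_, ?_⟩
    · rw [pvMarkRight, if_pos hstart, harg, heq]
      have : c + 1 + ((k:Nat):Int) = c + ((k+1:Nat):Int) := by push_cast; ring
      rw [this]
    · rw [hkeys, PySem.Dict.keys_insert_of_contains _ _ hstart]
    · intro x
      rw [hget x, PySem.Dict.get?_insert]
      by_cases hx : x = hi + 1 - ((k+1:Nat):Int) <;> push_cast at hx ⊢ <;>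
        split_ifs <;> first | rfl | omega

theorem interval_length_lt (lo x : Int) (keys : List Int) (h : lo ≤ x)
    (hsub : ∀ y, lo ≤ y → y ≤ x → y ∈ keys) : (x - lo).toNat < keys.length := by
  have hinj : Function.Injective (fun t : Nat => lo + (t : Int)) := by
    intro a b hab
    simp only at hab
    omega
  have hnd' : ((List.range' 0 ((x - lo).toNat + 1)).map (fun t : Nat => lo + (t : Int))).Nodup :=
    (List.nodup_range').map hinj
  have hsub' : ((List.range' 0 ((x - lo).toNat + 1)).map (fun t : Nat => lo + (t : Int))) ⊆ keys := by
    intro y hy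
    simp only [List.mem_map, List.mem_range'_1] at hy
    obtain ⟨t, ht, rfl⟩ := hy
    exact hsub _ (by omega) (by omega)
  have hle := (List.subperm_of_subset hnd' hsub').length_le
  simp only [List.length_map, List.length_range'] at hle
  omega

theorem pvRunEnd_consec (vals : List Int) (n : Nat) : ∀ (i : Nat), ∀ k, i ≤ k → k < pvRunEnd vals n i →
    vals.getD (k+1) 0 = vals.getD k 0 + 1 := by
  intro i
  induction i using pvRunEnd.induct vals n with
  | case1 j h ih =>
    intro k hk hlt
    rcases Nat.eq_or_lt_of_le hk with rfl | hk'
    · exact h.2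
    · rw [pvRunEnd, dif_pos h] at hlt
      exact ih k hk' hlt
  | case2 j h =>
    intro k hk hlt
    rw [pvRunEnd, dif_neg h] at hlt
    omega

theorem pvRunEnd_lt (vals : List Int) (n : Nat) : ∀ (i : Nat), i < n → pvRunEnd vals n i < n := by
  intro i
  induction i using pvRunEnd.induct vals n with
  | case1 j h ih => intro _; rw [pvRunEnd, dif_pos h]; exact ih (by omega)
  | case2 j h => intro hj; rw [pvRunEnd, dif_neg h]; exact hj

theorem pvRunEnd_stop (vals : List Int) (n : Nat) : ∀ (i : Nat), pvRunEnd vals n i + 1 < n →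
    ¬ vals.getD (pvRunEnd vals n i + 1) 0 = vals.getD (pvRunEnd vals n i) 0 + 1 := by
  intro i
  induction i using pvRunEnd.induct vals n with
  | case1 j h ih => rw [pvRunEnd, dif_pos h]; exact ih
  | case2 j h =>
    rw [pvRunEnd, dif_neg h]
    intro h1 h2
    exact h ⟨h1, h2⟩

theorem pvBuildRuns_spec (array vals : List Int) (n : Nat) (hn : n = vals.length)
    (hmem : ∀ x : Int, x ∈ vals ↔ x ∈ array)
    (hmono : ∀ (a b : Nat), a < b → b < n → vals.getD a 0 < vals.getD b 0) :
    ∀ (m i : Nat), n - i ≤ m → (i < n → vals.getD i 0 - 1 ∉ array) →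
    ∀ (d : PySem.Dict Int (Int × Int × Int)) (x : Int),
     ((∃ k, i ≤ k ∧ k < n ∧ vals.getD k 0 = x) →
        ∃ lo hi, (pvBuildRuns vals n i d).get? x = some (lo, hi, hi - lo + 1) ∧ IsRun array x lo hi)
    ∧ ((∀ k, i ≤ k → k < n → vals.getD k 0 ≠ x) → (pvBuildRuns vals n i d).get? x = d.get? x) := by
  have hstep : ∀ (i : Nat) (d : PySem.Dict Int (Int × Int × Int)), i < n →
      pvBuildRuns vals n i d = pvBuildRuns vals n (pvRunEnd vals n i + 1)
        ((List.range' i (pvRunEnd vals n i + 1 - i)).foldl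
          (fun d k => d.insert (vals.getD k 0)
            (vals.getD i 0, vals.getD (pvRunEnd vals n i) 0, ((pvRunEnd vals n i - i + 1 : Nat) : Int))) d) := by
    intro i d h
    rw [pvBuildRuns]
    simp only [dif_pos h]
  intro m
  induction m with
  | zero =>
    intro i hm hgap d x
    have hni : ¬ i < n := by omega
    constructor
    · rintro ⟨k, hk1, hk2, rfl⟩; omega
    · intro _; rw [pvBuildRuns, dif_neg hni]
  | succ m ih =>
    intro i hm hgap d x
    by_cases h : i < n
    · have hij : i ≤ pvRunEnd vals n i := pvRunEnd_ge vals n i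
      have hjn : pvRunEnd vals n i < n := pvRunEnd_lt vals n i h
      set j := pvRunEnd vals n i with hjdef
      have haff : ∀ t : Nat, i + t ≤ j → vals.getD (i + t) 0 = vals.getD i 0 + t := by
        intro t
        induction t with
        | zero => simp
        | succ t iht =>
          intro hle
          have h1 := iht (by omega)
          have h2 := pvRunEnd_consec vals n i (i + t) (by omega) (by omega)
          have h3 : i + (t + 1) = (i + t) + 1 := by omega
          rw [h3, h2, h1]
          push_cast; ring
      set lo := vals.getD i 0 with hlodef
      set hi := vals.getD j 0 with hhidef
      have hhi : hi = lo + ((j : Int) - i) := by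
        have h1 := haff (j - i) (by omega)
        rw [show i + (j - i) = j by omega] at h1
        rw [hhidef, h1]; push_cast; omega
      have hgetmem : ∀ a : Nat, a < n → vals.getD a 0 ∈ array := by
        intro a ha
        rw [hn] at ha
        rw [List.getD_eq_getElem vals 0 ha]
        exact (hmem _).mp (List.getElem_mem ha)
      have hcov : ∀ y : Int, lo ≤ y → y ≤ hi → y ∈ array := by
        intro y h1 h2
        have ht : i + (y - lo).toNat ≤ j := by omega
        have h3 := haff ((y - lo).toNat) ht
        have h4 : y = vals.getD (i + (y - lo).toNat) 0 := by rw [h3]; omega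
        rw [h4]; exact hgetmem _ (by omega)
      have hidx : ∀ y : Int, y ∈ array → ∃ a : Nat, a < n ∧ vals.getD a 0 = y := by
        intro y hy
        obtain ⟨a, ha, hv⟩ := List.mem_iff_getElem.mp ((hmem y).mpr hy)
        exact ⟨a, by omega, by rw [List.getD_eq_getElem vals 0 ha]; exact hv⟩
      have hjgap : j + 1 < n → vals.getD (j + 1) 0 ≥ hi + 2 := by
        intro hj1
        have hst := pvRunEnd_stop vals n i
        rw [← hjdef] at hst
        have hmono' := hmono j (j + 1) (by omega) hj1
        have := hst hj1
        omega
      have hbig : ∀ a : Nat, a < n → hi < vals.getD a 0 → j + 1 < n ∧ vals.getD (j + 1) 0 ≤ vals.getD a 0 := by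
        intro a ha hlt
        have haj : j < a := by
          by_contra hle
          push_neg at hle
          rcases Nat.lt_or_ge a j with h5 | h5
          · have := hmono a j h5 hjn; omega
          · have : a = j := by omega
            subst this; omega
        have h6 : j + 1 < n := by
          rcases Nat.lt_or_ge (j+1) n with h6 | h6
          · exact h6
          · omega
        refine ⟨h6, ?_⟩
        rcases Nat.lt_or_ge (j+1) a with h7 | h7
        · exact le_of_lt (hmono (j+1) a h7 ha)
        · have : a = j + 1 := by omega
          rw [this]
      have hhi1 : hi + 1 ∉ array := by
        intro hmem1
        obtain ⟨a, ha, hv⟩ := hidx _ hmem1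
        obtain ⟨h6, h7⟩ := hbig a ha (by omega)
        have := hjgap h6
        omega
      have hgap' : j + 1 < n → vals.getD (j + 1) 0 - 1 ∉ array := by
        intro hj1 hmem1
        have h8 := hjgap hj1
        obtain ⟨a, ha, hv⟩ := hidx _ hmem1
        obtain ⟨h6, h7⟩ := hbig a ha (by omega)
        omega
      have hrun : ∀ k : Nat, i ≤ k → k ≤ j → IsRun array (vals.getD k 0) lo hi := by
        intro k h1 h2
        have h3 := haff (k - i) (by omega)
        rw [show i + (k - i) = k by omega] at h3
        exact ⟨by omega, by omega, hcov, hgap h, hhi1⟩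
      have hlen : ((j - i + 1 : Nat) : Int) = hi - lo + 1 := by push_cast; omega
      constructor
      · rintro ⟨k, hk1, hk2, rfl⟩
        rw [hstep i d h, ← hjdef]
        by_cases hkj : k ≤ j
        · have hpres := (ih (j + 1) (by omega) hgap' ((List.range' i (j + 1 - i)).foldl (fun d k => d.insert (vals.getD k 0) (lo, hi, ((j - i + 1 : Nat) : Int))) d) (vals.getD k 0)).2 (by
            intro k' hk1' hk2' heq
            have := hmono k k' (by omega) hk2'
            omega)
          rw [hpres, foldl_insert_const_get?]
          rw [if_pos ⟨k, by simp only [List.mem_range'_1]; omega, rfl⟩]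
          exact ⟨lo, hi, by rw [hlen], hrun k hk1 hkj⟩
        · exact (ih (j + 1) (by omega) hgap' ((List.range' i (j + 1 - i)).foldl (fun d k => d.insert (vals.getD k 0) (lo, hi, ((j - i + 1 : Nat) : Int))) d) (vals.getD k 0)).1 ⟨k, by omega, hk2, rfl⟩
      · intro hnone
        rw [hstep i d h, ← hjdef]
        rw [(ih (j + 1) (by omega) hgap' ((List.range' i (j + 1 - i)).foldl (fun d k => d.insert (vals.getD k 0) (lo, hi, ((j - i + 1 : Nat) : Int))) d) x).2 (fun k hk1 hk2 => hnone k (by omega) hk2)]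
        rw [foldl_insert_const_get?, if_neg]
        rintro ⟨k', hk', heq⟩
        simp only [List.mem_range'_1] at hk'
        exact hnone k' (by omega) (by omega) heq
    · have hni := h
      constructor
      · rintro ⟨k, hk1, hk2, rfl⟩; omega
      · intro _; rw [pvBuildRuns, dif_neg hni]

theorem unVis_append_visited {array p : List Int} {num lo hi : Int}
    (hrun : IsRun array num lo hi) (hnot : ¬ UnVis array p num) (x : Int) :
    UnVis array (p ++ [num]) x ↔ UnVis array p x := by
  constructor
  · intro h q hq lo' hi' hr
    exact h q (List.mem_append_left _ hq) lo' hi' hr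
  · intro h q hq lo' hi' hr hqin
    rcases List.mem_append.mp hq with hq1 | hq1
    · exact h q hq1 lo' hi' hr hqin
    · have hq2 : q = num := by simpa using hq1
      subst hq2
      have hrnum : IsRun array q lo' hi' := isRun_of_mem hr hqin.1 hqin.2
      obtain ⟨e1, e2⟩ := isRun_unique hrnum hrun
      rw [UnVis] at hnot
      push_neg at hnot
      obtain ⟨q', hq'p, lo'', hi'', hr'', hin1, hin2⟩ := hnot
      obtain ⟨e3, e4⟩ := isRun_unique hr'' hrun
      exact h q' hq'p lo' hi' hr ⟨by omega, by omega⟩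

theorem unVis_append_out {array p : List Int} {num x lo hi : Int}
    (hrun : IsRun array num lo hi) (hx : ¬(lo ≤ x ∧ x ≤ hi)) :
    UnVis array (p ++ [num]) x ↔ UnVis array p x := by
  constructor
  · intro h q hq lo' hi' hr
    exact h q (List.mem_append_left _ hq) lo' hi' hr
  · intro h q hq lo' hi' hr hqin
    rcases List.mem_append.mp hq with hq1 | hq1
    · exact h q hq1 lo' hi' hr hqin
    · have hq2 : q = num := by simpa using hq1
      subst hq2
      have hrnum : IsRun array q lo' hi' := isRun_of_mem hr hqin.1 hqin.2
      obtain ⟨e1, e2⟩ := isRun_unique hrnum hrun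
      have hb1 := hr.1
      have hb2 := hr.2.1
      exact hx ⟨by omega, by omega⟩

theorem loop_eq (array : List Int) (runs : PySem.Dict Int (Int × Int × Int)) (fuel : Nat)
    (hruns : ∀ x ∈ array, ∃ lo hi, runs.get? x = some (lo, hi, hi - lo + 1) ∧ IsRun array x lo hi) :
    ∀ (rest p : List Int) (best : List Int) (longest : Int) (d : PySem.Dict Int Bool),
      (∀ x ∈ rest, x ∈ array) →
      (∀ x : Int, x ∉ array → d.get? x = none) →
      (∀ x : Int, x ∈ array → ∃ b, d.get? x = some b ∧ (b = true ↔ UnVis array p x)) →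
      d.keys.Nodup → d.keys.length < fuel →
      (∀ x lo hi : Int, x ∈ array → IsRun array x lo hi → ¬ UnVis array p x → hi - lo + 1 ≤ longest) →
      (rest.foldl (pvAStep fuel) (best, longest, d)).1 = (rest.foldl (pvBStep runs) (best, longest)).1 := by
  intro rest
  induction rest with
  | nil => intro p best longest d _ _ _ _ _ _; rfl
  | cons num rest' ih =>
    intro p best longest d hrest hd0 hd hnod hflen hlong
    have hnum : num ∈ array := hrest num List.mem_cons_self
    obtain ⟨lo, hi, hget, hrun⟩ := hruns num hnum
    obtain ⟨b, hb, hbiff⟩ := hd num hnum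
    have hBstep : pvBStep runs (best, longest) num =
        (if hi - lo + 1 > longest then (([lo, hi] : List Int), hi - lo + 1) else (best, longest)) := by
      simp [pvBStep, hget]
    have hgetD : d.getD num false = b := by rw [PySem.Dict.getD_eq_get?_getD, hb]; rfl
    rw [List.foldl_cons, List.foldl_cons, hBstep]
    cases b with
    | false =>
      have hnotun : ¬ UnVis array p num := fun hu => by simpa using hbiff.mpr hu
      have hAstep : pvAStep fuel (best, longest, d) num = (best, longest, d) := by
        simp [pvAStep, hgetD]
      have hle : hi - lo + 1 ≤ longest := hlong num lo hi hnum hrun hnotun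
      rw [hAstep, if_neg (by omega)]
      refine ih (p ++ [num]) best longest d (fun x hx => hrest x (List.mem_cons_of_mem _ hx)) hd0
        ?_ hnod hflen ?_
      · intro x hx
        obtain ⟨b', hb', hiff'⟩ := hd x hx
        exact ⟨b', hb', by rw [hiff', unVis_append_visited hrun hnotun]⟩
      · intro x lo' hi' hx hr hnu
        rw [unVis_append_visited hrun hnotun] at hnu
        exact hlong x lo' hi' hx hr hnu
    | true =>
      have hun : UnVis array p num := hbiff.mp rfl
      have hcontT : ∀ y : Int, y ∈ array → d.contains y = true := by
        intro y hy
        obtain ⟨by', hby, _⟩ := hd y hy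
        rw [PySem.Dict.contains_eq_isSome_get?, hby]
        rfl
      have hcontF : ∀ y : Int, y ∉ array → d.contains y = false := by
        intro y hy
        rw [PySem.Dict.contains_eq_isSome_get?, hd0 y hy]
        rfl
      obtain ⟨hlonum, hnumhi, hcov, hlo1, hhi1⟩ := hrun
      have hrun : IsRun array num lo hi := ⟨hlonum, hnumhi, hcov, hlo1, hhi1⟩
      have hsubkeys : ∀ y : Int, y ∈ array → y ∈ d.keys :=
        fun y hy => (PySem.Dict.contains_iff_mem_keys d y).mp (hcontT y hy)
      have hk1fuel : (num - lo).toNat < fuel := by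
        have := interval_length_lt lo num d.keys hlonum
          (fun y h1 h2 => hsubkeys y (hcov y h1 (by omega)))
        omega
      have hk2fuel : (hi - num).toNat < fuel := by
        have := interval_length_lt num hi d.keys hnumhi
          (fun y h1 h2 => hsubkeys y (hcov y (by omega) h2))
        omega
      have hcontIns : ∀ y : Int, y ∈ array → (d.insert num false).contains y = true := by
        intro y hy
        rw [PySem.Dict.contains_insert, hcontT y hy]
        simp
      obtain ⟨d2, hml, hmlkeys, hmlget⟩ := pvMarkLeft_spec lo ((num - lo).toNat)
        (d.insert num false) 1 fuel hk1fuel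
        (fun y h1 h2 => hcontIns y (hcov y h1 (by omega)))
        (by rw [PySem.Dict.contains_insert, hcontF _ hlo1]; simp; omega)
      have hd2cont : ∀ y : Int, d2.contains y = (d.insert num false).contains y := by
        intro y
        rw [PySem.Dict.contains_eq_decide_mem_keys, PySem.Dict.contains_eq_decide_mem_keys, hmlkeys]
      obtain ⟨d3, hmr, hmrkeys, hmrget⟩ := pvMarkRight_spec hi ((hi - num).toNat)
        d2 (1 + ((num - lo).toNat : Int)) fuel hk2fuel
        (fun y h1 h2 => by rw [hd2cont]; exact hcontIns y (hcov y (by omega) h2))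
        (by rw [hd2cont, PySem.Dict.contains_insert, hcontF _ hhi1]; simp; omega)
      have e1 : (num - 1 : Int) = lo - 1 + ((num - lo).toNat : Int) := by omega
      have e2 : (num + 1 : Int) = hi + 1 - ((hi - num).toNat : Int) := by omega
      have e3 : (1 : Int) + ((num - lo).toNat : Int) + ((hi - num).toNat : Int) = hi - lo + 1 := by
        omega
      have hAstep : pvAStep fuel (best, longest, d) num =
          (if hi - lo + 1 > longest then (([lo, hi] : List Int), hi - lo + 1, d3)
            else (best, longest, d3)) := by
        simp only [pvAStep, hgetD, Bool.not_true, Bool.false_eq_true, if_false]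
        rw [show (best, longest, d).2.2.insert num false = d.insert num false from rfl, e1, hml]
        simp only []
        rw [e2, hmr]
        simp only [e3]
        have e4 : (lo - 1 + 1 : Int) = lo := by omega
        have e5 : (hi + 1 - 1 : Int) = hi := by omega
        rw [e4, e5]
      have hd3get : ∀ x : Int, d3.get? x =
          if lo ≤ x ∧ x ≤ hi then some false else d.get? x := by
        intro x
        rw [hmrget x, hmlget x, PySem.Dict.get?_insert]
        split_ifs <;> first | rfl | omega
      have hd3keys : d3.keys = d.keys := by
        rw [hmrkeys, hmlkeys, PySem.Dict.keys_insert_of_contains _ _ (hcontT num hnum)]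
      have hd0' : ∀ x : Int, x ∉ array → d3.get? x = none := by
        intro x hx
        rw [hd3get x]
        split_ifs with hc1
        · exact absurd (hcov x hc1.1 hc1.2) hx
        · exact hd0 x hx
      have hd' : ∀ x : Int, x ∈ array →
          ∃ b', d3.get? x = some b' ∧ (b' = true ↔ UnVis array (p ++ [num]) x) := by
        intro x hx
        rw [hd3get x]
        split_ifs with hc1
        · refine ⟨false, rfl, ?_⟩
          simp only [Bool.false_eq_true, false_iff]
          intro hu
          exact hu num (List.mem_append_right _ (by simp)) lo hi
            (isRun_of_mem hrun hc1.1 hc1.2) ⟨hlonum, hnumhi⟩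
        · obtain ⟨b', hb', hiff'⟩ := hd x hx
          exact ⟨b', hb', by rw [hiff', unVis_append_out hrun hc1]⟩
      have hlong' : ∀ x lo' hi' : Int, x ∈ array → IsRun array x lo' hi' →
          ¬ UnVis array (p ++ [num]) x →
          hi' - lo' + 1 ≤ (if hi - lo + 1 > longest then hi - lo + 1 else longest) := by
        intro x lo' hi' hx hr hnu
        by_cases hin : lo ≤ x ∧ x ≤ hi
        · obtain ⟨f1, f2⟩ := isRun_unique hr (isRun_of_mem hrun hin.1 hin.2)
          split_ifs <;> omega
        · rw [unVis_append_out hrun hin] at hnu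
          have := hlong x lo' hi' hx hr hnu
          split_ifs <;> omega
      rw [hAstep]
      by_cases hc : hi - lo + 1 > longest
      · rw [if_pos hc, if_pos hc]
        refine ih (p ++ [num]) [lo, hi] (hi - lo + 1) d3
          (fun x hx => hrest x (List.mem_cons_of_mem _ hx)) hd0' hd'
          (by rw [hd3keys]; exact hnod) (by rw [hd3keys]; exact hflen) ?_
        intro x lo' hi' hx hr hnu
        have := hlong' x lo' hi' hx hr hnu
        rw [if_pos hc] at this
        exact this
      · rw [if_neg hc, if_neg hc]
        refine ih (p ++ [num]) best longest d3
          (fun x hx => hrest x (List.mem_cons_of_mem _ hx)) hd0' hd'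
          (by rw [hd3keys]; exact hnod) (by rw [hd3keys]; exact hflen) ?_
        intro x lo' hi' hx hr hnu
        have := hlong' x lo' hi' hx hr hnu
        rw [if_neg hc] at this
        exact this

-- ===== VERDICT (by name: the statement is the Claim_ definition above) =====
theorem largestRange_spec : Claim_equal_largestRange := by
  unfold Claim_equal_largestRange
  intro array _
  unfold Spec_largestRange largestRange largestRange_alt
  set vals := PySem.List.sorted (PySem.Set.ofList array) (fun x => x) false with hvals
  set nums := array.foldl (fun d num => d.insert num true) PySem.Dict.empty with hnums
  set runs := pvBuildRuns vals vals.length 0 PySem.Dict.empty with hruns0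
  have hmemvals : ∀ x : Int, x ∈ vals ↔ x ∈ array := by
    intro x
    rw [hvals, PySem.List.mem_sorted, PySem.Set.mem_ofList]
  have hmono : ∀ a b : Nat, a < b → b < vals.length → vals.getD a 0 < vals.getD b 0 := by
    intro a b hab hb
    have hp : vals.Pairwise (· < ·) := PySem.List.sorted_ofList_pairwise_lt array
    rw [List.getD_eq_getElem vals 0 (by omega), List.getD_eq_getElem vals 0 hb]
    exact List.pairwise_iff_getElem.mp hp a b (by omega) hb hab
  have hgap0 : 0 < vals.length → vals.getD 0 0 - 1 ∉ array := by
    intro h hmem1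
    obtain ⟨a, ha, hv⟩ := List.mem_iff_getElem.mp ((hmemvals _).mpr hmem1)
    rw [← List.getD_eq_getElem vals 0 ha] at hv
    rcases Nat.eq_zero_or_pos a with rfl | hpos
    · omega
    · have := hmono 0 a hpos ha
      omega
  have hrunsAll : ∀ x ∈ array, ∃ lo hi,
      runs.get? x = some (lo, hi, hi - lo + 1) ∧ IsRun array x lo hi := by
    intro x hx
    obtain ⟨a, ha, hv⟩ := List.mem_iff_getElem.mp ((hmemvals x).mpr hx)
    exact (pvBuildRuns_spec array vals vals.length rfl hmemvals hmono vals.length 0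
      (by omega) hgap0 PySem.Dict.empty x).1
      ⟨a, by omega, ha, by rw [List.getD_eq_getElem vals 0 ha]; exact hv⟩
  have hnums_get : ∀ x : Int, nums.get? x = if x ∈ array then some true else none := by
    intro x
    rw [hnums, foldl_insert_const_get? (fun y : Int => y) true array PySem.Dict.empty x]
    by_cases hx : x ∈ array <;> simp [hx]
  have hd0 : ∀ x : Int, x ∉ array → nums.get? x = none := by
    intro x hx
    rw [hnums_get x, if_neg hx]
  have hd : ∀ x : Int, x ∈ array →
      ∃ b, nums.get? x = some b ∧ (b = true ↔ UnVis array [] x) := by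
    intro x hx
    refine ⟨true, by rw [hnums_get x, if_pos hx], ?_, fun _ => rfl⟩
    intro _ q hq
    exact absurd hq (List.not_mem_nil)
  have hnodup : nums.keys.Nodup := by
    rw [hnums]
    exact PySem.Dict.nodup_keys_foldl_insert array (fun _ _ => true) PySem.Dict.empty
      PySem.Dict.nodup_keys_empty
  have hsize : nums.size = nums.keys.length := by
    simp [PySem.Dict.size, PySem.Dict.keys]
  have hlong0 : ∀ x lo hi : Int, x ∈ array → IsRun array x lo hi →
      ¬ UnVis array [] x → hi - lo + 1 ≤ (0 : Int) := by
    intro x lo hi _ _ hnu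
    exact absurd (fun q hq => absurd hq (List.not_mem_nil)) hnu
  exact loop_eq array runs (nums.size + 1) hrunsAll array [] [] 0 nums
    (fun x hx => hx) hd0 hd hnodup (by omega) hlong0
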